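-- pv_equiv track=rewrite | github.com/fabriciodisalvo/super-duper-spork | cryptogram_helper.py | generate_candidate_list
-- ===== SOURCE A (Python) =====
-- letters = ['A', 'B', 'C', 'D', 'E', 'F', 'G', 'H', 'I', 'J', 'K', 'L', 'M', 'N', 'O', 'P', 'Q', 'R', 'S', 'T', 'U', 'V', 'W', 'X', 'Y', 'Z']
--
-- def generate_candidate_list(crypto_list, all_english_words, candidate_dict):
--     for this_word in crypto_list:
--         word_format = check_word_format(this_word)
--         possible_candidates = []
--         for possible_candidate in all_english_words:
--             if len(possible_candidate) == len(this_word):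
--                 candidate_word_format = check_word_format(possible_candidate)
--                 if candidate_word_format == word_format:
--                     possible_candidates.append(possible_candidate.upper())
--         candidate_dict[this_word] = possible_candidates
--     return candidate_dict
--
-- def check_word_format(word):
--     available_letters = letters.copy()
--     word_format = ""
--     dict_letters = {}
--     for letter in word:
--         if letter in dict_letters:
--             word_format = word_format + dict_letters[letter]
--         else:
--             dict_letters[letter] = available_letters.pop(0)
--             word_format = word_format + dict_letters[letter]
--     return(word_format)
-- ===== SOURCE B (Python) =====
-- letters = ['A', 'B', 'C', 'D', 'E', 'F', 'G', 'H', 'I', 'J', 'K', 'L', 'M', 'N', 'O', 'P', 'Q', 'R', 'S', 'T', 'U', 'V', 'W', 'X', 'Y', 'Z']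
--
-- def check_word_format(word):
--     available_letters = letters.copy()
--     word_format = ""
--     dict_letters = {}
--     for letter in word:
--         if letter in dict_letters:
--             word_format = word_format + dict_letters[letter]
--         else:
--             dict_letters[letter] = available_letters.pop(0)
--             word_format = word_format + dict_letters[letter]
--     return word_format
--
-- def generate_candidate_list(crypto_list, all_english_words, candidate_dict):
--     # One pass over the English words: group (uppercased) words by their format,
--     # skipping lengths no crypto word has; then one lookup per crypto word.
--     wanted_lengths = {len(w) for w in crypto_list}
--     by_format = {}
--     for word in all_english_words:
--         if len(word) in wanted_lengths:
--             by_format.setdefault(check_word_format(word), []).append(word.upper())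
--     for this_word in crypto_list:
--         candidate_dict[this_word] = by_format.get(check_word_format(this_word), [])
--     return candidate_dict
-- ===== Notes on version B (the rewrite author's own statement) =====
-- stated objective: faster
-- what changed: B makes one pass over the English words, grouping their uppercased forms in a format->words dictionary (skipping lengths no crypto word has), then answers each crypto word with a single dictionary lookup, instead of rescanning the whole English list for every crypto word.
import Mathlib
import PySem

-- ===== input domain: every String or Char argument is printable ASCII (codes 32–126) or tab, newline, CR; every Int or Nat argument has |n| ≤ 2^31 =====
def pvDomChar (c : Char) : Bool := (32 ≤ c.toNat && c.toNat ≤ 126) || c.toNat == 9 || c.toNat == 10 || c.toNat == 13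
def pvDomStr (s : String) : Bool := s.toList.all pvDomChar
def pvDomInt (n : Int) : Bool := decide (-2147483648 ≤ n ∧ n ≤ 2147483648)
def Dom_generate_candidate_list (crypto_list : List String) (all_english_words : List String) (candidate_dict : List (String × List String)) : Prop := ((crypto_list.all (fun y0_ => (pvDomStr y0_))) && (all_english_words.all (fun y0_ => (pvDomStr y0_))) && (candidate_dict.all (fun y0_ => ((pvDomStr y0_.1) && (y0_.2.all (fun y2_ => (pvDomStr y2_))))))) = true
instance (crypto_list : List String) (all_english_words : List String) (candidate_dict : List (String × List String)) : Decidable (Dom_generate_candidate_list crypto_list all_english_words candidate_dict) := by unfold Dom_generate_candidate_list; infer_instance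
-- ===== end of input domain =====

-- B builds a format→words dictionary in ONE pass over the English list and answers each
-- crypto word by a single lookup, instead of rescanning every English word per crypto word.
-- A mutates candidate_dict in place and returns it; B performs the same per-key assignments,
-- and the equivalence proved here is about the returned dict value.

-- ===== PORT A =====
-- module constant `letters`; its elements are single-character strings, modelled as Char
def lettersChars : List Char :=
  ['A', 'B', 'C', 'D', 'E', 'F', 'G', 'H', 'I', 'J', 'K', 'L', 'M',
   'N', 'O', 'P', 'Q', 'R', 'S', 'T', 'U', 'V', 'W', 'X', 'Y', 'Z']

-- the loop of check_word_format; state = (remaining letters of the word, available_letters,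
-- dict_letters, word_format so far); `none` = the IndexError of available_letters.pop(0)
def fmtGo : List Char → List Char → PySem.Dict Char Char → List Char → Option (List Char)
  | [], _, _, acc => some acc
  | c :: cs, avail, d, acc =>
    match d.get? c with
    | some v => fmtGo cs avail d (acc ++ [v])
    | none =>
      match avail with
      | [] => none                                   -- available_letters.pop(0): IndexError
      | a :: rest => fmtGo cs rest (d.insert c a) (acc ++ [a])

def check_word_format (word : String) : Option (List Char) :=
  fmtGo word.toList lettersChars PySem.Dict.empty []

-- the inner `for possible_candidate in all_english_words` loop, accumulating possible_candidates
def innerA : List String → String → List Char → List String → Option (List String)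
  | [], _, _, acc => some acc
  | e :: es, w, f, acc =>
    if PySem.Str.len e = PySem.Str.len w then
      match check_word_format e with
      | none => none
      | some g => innerA es w f (if g = f then acc ++ [PySem.Str.upper e] else acc)
    else innerA es w f acc

-- the outer `for this_word in crypto_list` loop
def genA : List String → List String → PySem.Dict String (List String) →
    Option (PySem.Dict String (List String))
  | [], _, d => some d
  | w :: ws, eng, d =>
    match check_word_format w with
    | none => none
    | some f =>
      match innerA eng w f [] with
      | none => none
      | some cands => genA ws eng (d.insert w cands)

def generate_candidate_list (crypto_list : List String) (all_english_words : List String) (candidate_dict : List (String × List String)) : List (String × List String) :=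
  -- the .getD default is reached only where the Python raises IndexError (outside Pre_)
  ((genA crypto_list all_english_words (PySem.Dict.mk candidate_dict)).getD
    (PySem.Dict.mk candidate_dict)).items

-- ===== PORT B =====
-- Source B's one grouping pass: by_format.setdefault(fmt, []).append(word.upper()) when the
-- word's length is a wanted length; a word whose format raises in Python is skipped
-- (that input is outside Pre_, where Python B raises)
def buildB : List String → PySem.Set Int → PySem.Dict (List Char) (List String) →
    PySem.Dict (List Char) (List String)
  | [], _, m => m
  | e :: es, lens, m =>
    if PySem.Set.contains lens (PySem.Str.len e) then
      match check_word_format e with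
      | some g => buildB es lens (m.modify g [] (· ++ [PySem.Str.upper e]))
      | none => buildB es lens m
    else buildB es lens m

-- Source B's second loop: one dictionary lookup per crypto word
def fillB : List String → PySem.Dict (List Char) (List String) →
    PySem.Dict String (List String) → PySem.Dict String (List String)
  | [], _, d => d
  | w :: ws, m, d =>
    match check_word_format w with
    | some f => fillB ws m (d.insert w (m.getD f []))
    | none => fillB ws m d

def generate_candidate_list_alt (crypto_list : List String) (all_english_words : List String) (candidate_dict : List (String × List String)) : List (String × List String) :=
  let lens : PySem.Set Int := PySem.Set.ofList (crypto_list.map PySem.Str.len)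
  (fillB crypto_list (buildB all_english_words lens PySem.Dict.empty)
    (PySem.Dict.mk candidate_dict)).items

-- ===== PRECONDITION & SPEC =====
-- Pre_ excludes exactly the inputs on which the Python A raises IndexError
-- (available_letters.pop(0) on an empty list): a crypto word with more than 26 distinct
-- characters, or an English word of the same length as some crypto word with more than
-- 26 distinct characters.
def Pre_generate_candidate_list (crypto_list : List String) (all_english_words : List String) (candidate_dict : List (String × List String)) : Prop :=
  (∀ w ∈ crypto_list, (PySem.Set.ofList w.toList).length ≤ 26) ∧
  (∀ x ∈ all_english_words, (∃ w ∈ crypto_list, PySem.Str.len x = PySem.Str.len w) →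
    (PySem.Set.ofList x.toList).length ≤ 26)
instance (crypto_list : List String) (all_english_words : List String) (candidate_dict : List (String × List String)) : Decidable (Pre_generate_candidate_list crypto_list all_english_words candidate_dict) := by unfold Pre_generate_candidate_list; infer_instance

def pvWitness_generate_candidate_list : List String × List String × (List (String × List String)) :=
  (["abca", "xy"], ["noon", "deed", "to", "onto"], [("old", ["KEPT"])])

def Spec_generate_candidate_list (crypto_list : List String) (all_english_words : List String) (candidate_dict : List (String × List String)) (out : List (String × List String)) : Prop := out = generate_candidate_list_alt crypto_list all_english_words candidate_dict
instance (crypto_list : List String) (all_english_words : List String) (candidate_dict : List (String × List String)) (out : List (String × List String)) : Decidable (Spec_generate_candidate_list crypto_list all_english_words candidate_dict out) := by unfold Spec_generate_candidate_list; infer_instance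

-- ===== CLAIM (what is proved, stated in full; the proofs are below) =====
def Claim_equal_generate_candidate_list : Prop := ∀ (crypto_list : List String) (all_english_words : List String) (candidate_dict : List (String × List String)), Dom_generate_candidate_list crypto_list all_english_words candidate_dict → Pre_generate_candidate_list crypto_list all_english_words candidate_dict → Spec_generate_candidate_list crypto_list all_english_words candidate_dict (generate_candidate_list crypto_list all_english_words candidate_dict)

-- ===== LEMMAS AND PROOFS =====

theorem fmtGo_length (cs : List Char) : ∀ (avail : List Char) (d : PySem.Dict Char Char)
    (acc r : List Char), fmtGo cs avail d acc = some r → r.length = acc.length + cs.length := by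
  induction cs with
  | nil => intro avail d acc r h; simp [fmtGo] at h; simp [← h]
  | cons c cs ih =>
    intro avail d acc r h
    simp only [fmtGo] at h
    cases hg : d.get? c with
    | some v =>
      rw [hg] at h
      have := ih avail d (acc ++ [v]) r h
      simp at this; simp [this]; omega
    | none =>
      rw [hg] at h
      cases avail with
      | nil => simp at h
      | cons a rest =>
        have := ih rest (d.insert c a) (acc ++ [a]) r h
        simp at this; simp [this]; omega

theorem check_word_format_length (w : String) (f : List Char)
    (h : check_word_format w = some f) : f.length = w.toList.length := by
  have := fmtGo_length w.toList lettersChars PySem.Dict.empty [] f h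
  simpa using this

theorem fmtGo_isSome (cs : List Char) : ∀ (avail : List Char) (d : PySem.Dict Char Char)
    (acc : List Char),
    (cs.toFinset.filter (fun ch => d.contains ch = false)).card ≤ avail.length →
    (fmtGo cs avail d acc).isSome := by
  induction cs with
  | nil => intro avail d acc _; simp [fmtGo]
  | cons c cs ih =>
    intro avail d acc h
    simp only [fmtGo]
    cases hg : d.get? c with
    | some v =>
      apply ih
      refine le_trans (Finset.card_le_card (Finset.filter_subset_filter _ ?_)) h
      rw [List.toFinset_cons]; exact Finset.subset_insert _ _
    | none =>
      have hc : d.contains c = false := by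
        rw [PySem.Dict.contains_eq_isSome_get?, hg]; rfl
      have hcmem : c ∈ (c :: cs).toFinset.filter (fun ch => d.contains ch = false) :=
        Finset.mem_filter.mpr ⟨by simp, hc⟩
      cases avail with
      | nil =>
        exfalso
        have hpos := Finset.card_pos.mpr ⟨c, hcmem⟩
        rw [List.length_nil] at h
        omega
      | cons a rest =>
        apply ih
        have hsub : cs.toFinset.filter (fun ch => (d.insert c a).contains ch = false) ⊆
            ((c :: cs).toFinset.filter (fun ch => d.contains ch = false)).erase c := by
          intro x hx
          obtain ⟨hx1, hx2⟩ := Finset.mem_filter.mp hx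
          rw [PySem.Dict.contains_insert] at hx2
          have hxc : (x == c) = false := by cases hxc : (x == c) <;> simp [hxc] at hx2 ⊢
          have hxd : d.contains x = false := by cases hxd : d.contains x <;> simp [hxd, hxc] at hx2 ⊢
          refine Finset.mem_erase.mpr ⟨by simpa using hxc, Finset.mem_filter.mpr ⟨?_, hxd⟩⟩
          rw [List.toFinset_cons]; exact Finset.mem_insert_of_mem hx1
        have h1 := Finset.card_le_card hsub
        rw [Finset.card_erase_of_mem hcmem] at h1
        rw [List.length_cons] at h
        omega

theorem check_word_format_isSome (w : String)
    (h : (PySem.Set.ofList w.toList).length ≤ 26) : (check_word_format w).isSome := by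
  unfold check_word_format
  apply fmtGo_isSome
  have h1 : (w.toList.toFinset.filter (fun ch => (PySem.Dict.empty (κ := Char) (ν := Char)).contains ch = false)) = w.toList.toFinset := by
    apply Finset.filter_true_of_mem; intro x _; simp [PySem.Dict.contains_empty]
  rw [h1]
  have h2 : (PySem.Set.ofList w.toList).toFinset = w.toList.toFinset := by
    ext x; simp [List.mem_toFinset, PySem.Set.mem_ofList]
  have h3 := List.toFinset_card_of_nodup (PySem.Set.nodup_ofList w.toList)
  rw [h2] at h3
  simp [lettersChars]
  omega

def selB (lens : PySem.Set Int) (f : List Char) (e : String) : Option String :=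
  if PySem.Set.contains lens (PySem.Str.len e) = true ∧ check_word_format e = some f then
    some (PySem.Str.upper e) else none

def selA (w : String) (f : List Char) (e : String) : Option String :=
  if PySem.Str.len e = PySem.Str.len w ∧ check_word_format e = some f then
    some (PySem.Str.upper e) else none

theorem buildB_getD (es : List String) (lens : PySem.Set Int) (f : List Char) :
    ∀ m : PySem.Dict (List Char) (List String),
    (buildB es lens m).getD f [] = m.getD f [] ++ es.filterMap (selB lens f) := by
  induction es with
  | nil => intro m; simp [buildB]
  | cons e es ih =>
    intro m
    by_cases hl : PySem.Set.contains lens (PySem.Str.len e) = true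
    · cases hg : check_word_format e with
      | some g =>
        by_cases hfg : f = g
        · subst hfg
          have hsel : selB lens f e = some (PySem.Str.upper e) := by
            unfold selB; rw [if_pos ⟨hl, hg⟩]
          simp only [buildB, hl, if_true, hg, List.filterMap_cons, hsel]
          rw [ih, PySem.Dict.getD_modify, if_pos rfl]
          simp
        · have hsel : selB lens f e = none := by
            unfold selB; rw [if_neg]; rintro ⟨-, h2⟩
            rw [hg] at h2; exact hfg (Option.some.inj h2).symm
          simp only [buildB, hl, if_true, hg, List.filterMap_cons, hsel]
          rw [ih, PySem.Dict.getD_modify, if_neg hfg]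
      | none =>
        have hsel : selB lens f e = none := by
          unfold selB; rw [if_neg]; rintro ⟨-, h2⟩; rw [hg] at h2; simp at h2
        simp only [buildB, hl, if_true, hg, List.filterMap_cons, hsel]
        exact ih m
    · have hsel : selB lens f e = none := by
        unfold selB; rw [if_neg]; rintro ⟨h1, -⟩; exact hl h1
      simp only [buildB, hl, List.filterMap_cons, hsel]
      exact ih m

theorem innerA_some (es : List String) (w : String) (f : List Char)
    (h : ∀ e ∈ es, PySem.Str.len e = PySem.Str.len w → (check_word_format e).isSome) :
    ∀ acc : List String, innerA es w f acc = some (acc ++ es.filterMap (selA w f)) := by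
  induction es with
  | nil => intro acc; simp [innerA]
  | cons e es ih =>
    intro acc
    have htail : ∀ e' ∈ es, PySem.Str.len e' = PySem.Str.len w → (check_word_format e').isSome :=
      fun e' he' => h e' (List.mem_cons_of_mem _ he')
    by_cases hlen : PySem.Str.len e = PySem.Str.len w
    · obtain ⟨g, hg⟩ := Option.isSome_iff_exists.mp (h e List.mem_cons_self hlen)
      by_cases hgf : g = f
      · subst hgf
        have hsel : selA w g e = some (PySem.Str.upper e) := by
          unfold selA; rw [if_pos ⟨hlen, hg⟩]
        simp only [innerA, hlen, if_true, hg, List.filterMap_cons, hsel]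
        rw [ih htail]
        simp
      · have hsel : selA w f e = none := by
          unfold selA; rw [if_neg]; rintro ⟨-, h2⟩
          rw [hg] at h2; exact hgf (Option.some.inj h2)
        simp only [innerA, hlen, if_true, hg, List.filterMap_cons, hsel, if_neg hgf]
        exact ih htail acc
    · have hsel : selA w f e = none := by
        unfold selA; rw [if_neg]; rintro ⟨h1, -⟩; exact hlen h1
      simp only [innerA, hlen, List.filterMap_cons, hsel]
      exact ih htail acc

theorem sel_eq (c : List String) (w : String) (f : List Char) (hw : w ∈ c)
    (hwf : check_word_format w = some f) (e : String) :
    selA w f e = selB (PySem.Set.ofList (c.map PySem.Str.len)) f e := by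
  by_cases hfmt : check_word_format e = some f
  · have hlen : PySem.Str.len e = PySem.Str.len w := by
      have h1 := check_word_format_length e f hfmt
      have h2 := check_word_format_length w f hwf
      rw [PySem.Str.len_eq, PySem.Str.len_eq, ← h1, ← h2]
    have hcont : PySem.Set.contains (PySem.Set.ofList (c.map PySem.Str.len)) (PySem.Str.len e) = true := by
      have hmem : PySem.Str.len e ∈ PySem.Set.ofList (c.map PySem.Str.len) := by
        rw [PySem.Set.mem_ofList, hlen]; exact List.mem_map_of_mem hw
      simpa [PySem.Set.contains] using hmem
    unfold selA selB
    rw [if_pos ⟨hlen, hfmt⟩, if_pos ⟨hcont, hfmt⟩]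
  · unfold selA selB
    rw [if_neg (fun h => hfmt h.2), if_neg (fun h => hfmt h.2)]

theorem gen_eq (c eng : List String) (ws : List String)
    (hsub : ∀ w ∈ ws, w ∈ c)
    (hc : ∀ w ∈ c, (PySem.Set.ofList w.toList).length ≤ 26)
    (he : ∀ x ∈ eng, (∃ w ∈ c, PySem.Str.len x = PySem.Str.len w) →
      (PySem.Set.ofList x.toList).length ≤ 26) :
    ∀ d : PySem.Dict String (List String),
    genA ws eng d =
      some (fillB ws (buildB eng (PySem.Set.ofList (c.map PySem.Str.len)) PySem.Dict.empty) d) := by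
  induction ws with
  | nil => intro d; simp [genA, fillB]
  | cons w ws ih =>
    intro d
    have hwc : w ∈ c := hsub w List.mem_cons_self
    obtain ⟨f, hf⟩ := Option.isSome_iff_exists.mp (check_word_format_isSome w (hc w hwc))
    have hi : innerA eng w f [] = some (eng.filterMap (selA w f)) := by
      rw [innerA_some eng w f
        (fun e hee hlen => check_word_format_isSome e (he e hee ⟨w, hwc, hlen⟩)) []]
      rw [List.nil_append]
    have hb : (buildB eng (PySem.Set.ofList (c.map PySem.Str.len)) PySem.Dict.empty).getD f [] =
        eng.filterMap (selB (PySem.Set.ofList (c.map PySem.Str.len)) f) := by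
      rw [buildB_getD, PySem.Dict.getD_empty, List.nil_append]
    have hsel : eng.filterMap (selA w f) =
        eng.filterMap (selB (PySem.Set.ofList (c.map PySem.Str.len)) f) :=
      List.filterMap_congr (fun e _ => sel_eq c w f hwc hf e)
    simp only [genA, fillB, hf, hi, hsel, hb]
    exact ih (fun x hx => hsub x (List.mem_cons_of_mem _ hx)) _

-- ===== VERDICT (by name: the statement is the Claim_ definition above) =====
theorem generate_candidate_list_spec : Claim_equal_generate_candidate_list := by
  intro c e cd _ hpre
  unfold Spec_generate_candidate_list generate_candidate_list generate_candidate_list_alt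
  rw [gen_eq c e c (fun _ h => h) hpre.1 hpre.2 (PySem.Dict.mk cd)]
  rfl
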